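-- pv_equiv track=rewrite | github.com/jsmtaa/dsa-practice | contests/umak-cs-it-skills-2025/alternating-char-pairs/program.py | alternating_pairs
-- ===== SOURCE A (Python) =====
-- def alternating_pairs(s):
--     # prefix transform
--     pref = [0]
--     vowels = set("aeiou")
--     for c in s:
--         pref.append(pref[-1] + (1 if c in vowels else -1))
--
--     l = 0
--     c = 0
--     for r in range(1, len(s)):
--         if pref[r+1] - pref[l] == 0:
--             c += 1
--         l += 1
--     return c
-- ===== SOURCE B (Python) =====
-- def alternating_pairs(s):
--     vowels = "aeiou"
--     return sum((a in vowels) != (b in vowels) for a, b in zip(s, s[1:]))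
-- ===== Notes on version B (the rewrite author's own statement) =====
-- stated objective: simpler
-- what changed: Drops A's prefix-sum array and two-phase build-table-then-scan-windows decomposition; B does one direct pass over adjacent pairs (zip of s with s[1:]) counting pairs whose vowel-ness differs, avoiding the auxiliary O(n) list.
import Mathlib
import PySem

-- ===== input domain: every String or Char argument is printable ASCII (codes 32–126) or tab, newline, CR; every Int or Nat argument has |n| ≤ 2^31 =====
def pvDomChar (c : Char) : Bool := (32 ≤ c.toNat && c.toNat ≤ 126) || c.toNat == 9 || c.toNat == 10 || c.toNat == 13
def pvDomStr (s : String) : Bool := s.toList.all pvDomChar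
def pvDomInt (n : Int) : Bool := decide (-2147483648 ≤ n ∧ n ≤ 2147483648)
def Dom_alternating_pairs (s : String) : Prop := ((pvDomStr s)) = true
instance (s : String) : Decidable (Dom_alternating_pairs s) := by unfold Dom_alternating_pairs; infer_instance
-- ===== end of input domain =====

-- B replaces A's prefix-sum table + window scan with one direct pass over adjacent
-- pairs (objective: simpler); return values proved equal on all inputs.

-- ===== PORT A =====
def alternating_pairs (s : String) : Int :=
  let vowels : List Char := PySem.Set.ofList "aeiou".toList
  let pref : List Int := s.toList.foldl
    (fun p c => p ++ [PySem.List.pyGetD p (-1) 0 + (if c ∈ vowels then (1:Int) else -1)]) [0]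
  let res := (PySem.List.pyRange 1 (s.toList.length : Int) 1).foldl
    (fun (st : Int × Int) r =>
      (st.1 + 1,
       if PySem.List.pyGetD pref (r + 1) 0 - PySem.List.pyGetD pref st.1 0 = 0
       then st.2 + 1 else st.2))
    (0, 0)
  res.2

-- ===== PORT B =====
def alternating_pairs_alt (s : String) : Int :=
  let cs := s.toList
  ((cs.zip (cs.drop 1)).countP
    (fun p => ("aeiou".toList.contains p.1) != ("aeiou".toList.contains p.2)) : Nat)

-- ===== PRECONDITION & SPEC =====
def Spec_alternating_pairs (s : String) (out : Int) : Prop := out = alternating_pairs_alt s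
instance (s : String) (out : Int) : Decidable (Spec_alternating_pairs s out) := by unfold Spec_alternating_pairs; infer_instance

-- ===== CLAIM (what is proved, stated in full; the proofs are below) =====
def Claim_equal_alternating_pairs : Prop := ∀ (s : String), Dom_alternating_pairs s → Spec_alternating_pairs s (alternating_pairs s)

-- ===== LEMMAS AND PROOFS =====

def pvV (c : Char) : Bool := "aeiou".toList.contains c
def pvStep (c : Char) : Int := if pvV c then 1 else -1
def pvBal (l : List Char) : Int := (l.map pvStep).sum
def pvTail (a : Int) : List Char → List Int
  | [] => []
  | c :: t => (a + pvStep c) :: pvTail (a + pvStep c) t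
def pvSpec : List Char → Nat
  | a :: b :: t => (if pvV a != pvV b then 1 else 0) + pvSpec (b :: t)
  | _ => 0

lemma pv_tail_getD (cs : List Char) : ∀ (a : Int) (k : Nat), k < cs.length →
    (pvTail a cs).getD k 0 = a + pvBal (cs.take (k + 1)) := by
  induction cs with
  | nil => intro a k h; simp at h
  | cons c t ih =>
    intro a k h
    cases k with
    | zero => simp [pvTail, pvBal]
    | succ k =>
      simp only [pvTail, List.getD_cons_succ, List.take_succ_cons, pvBal, List.map_cons,
        List.sum_cons]
      rw [ih (a + pvStep c) k (by simpa using h)]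
      simp only [pvBal]
      ring

lemma pv_window (cs : List Char) : ∀ (k : Nat), k + 1 < cs.length →
    pvBal (cs.take (k + 2)) - pvBal (cs.take k)
      = pvStep (cs.getD k 'a') + pvStep (cs.getD (k + 1) 'a') := by
  induction cs with
  | nil => intro k h; simp at h
  | cons c t ih =>
    intro k h
    cases k with
    | zero =>
      cases t with
      | nil => simp at h
      | cons b t' => simp [pvBal]; try ring
    | succ k =>
      have h3 : k + 1 + 2 = (k + 2) + 1 := by omega
      rw [h3]
      simp only [List.take_succ_cons, List.getD_cons_succ, pvBal, List.map_cons, List.sum_cons]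
      have := ih k (by simpa using h)
      simp only [pvBal] at this
      omega

lemma pv_loop (pref : List Int) : ∀ (m : Nat) (a b l0 c0 : Int), (b - a).toNat = m → l0 = a - 1 →
    ((PySem.List.pyRange a b 1).foldl
      (fun (st : Int × Int) r =>
        (st.1 + 1,
         if PySem.List.pyGetD pref (r + 1) 0 - PySem.List.pyGetD pref st.1 0 = 0
         then st.2 + 1 else st.2)) (l0, c0)).2
    = c0 + ((PySem.List.pyRange a b 1).countP
        (fun r => decide (PySem.List.pyGetD pref (r + 1) 0 - PySem.List.pyGetD pref (r - 1) 0 = 0)) : Nat) := by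
  intro m
  induction m with
  | zero =>
    intro a b l0 c0 h hl
    rw [PySem.List.pyRange_one_eq_nil (by omega)]
    simp
  | succ m ih =>
    intro a b l0 c0 h hl
    rw [PySem.List.pyRange_one_cons (by omega)]
    simp only [List.foldl_cons, List.countP_cons, hl]
    rw [show a - 1 + 1 = a by ring]
    rw [ih (a + 1) b a _ (by omega) (by ring)]
    simp only [decide_eq_true_eq]
    split_ifs with hc
    · push_cast; ring
    · push_cast; ring

lemma pv_zip_spec (cs : List Char) :
    ((cs.zip (cs.drop 1)).countP (fun p => pvV p.1 != pvV p.2)) = pvSpec cs := by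
  induction cs with
  | nil => simp [pvSpec]
  | cons a t ih =>
    cases t with
    | nil => simp [pvSpec]
    | cons b t' =>
      simp only [List.drop_one, List.tail_cons, List.zip_cons_cons, List.countP_cons, pvSpec]
      rw [← ih]
      simp only [List.drop_one, List.tail_cons]
      split_ifs with h
      · simp [Nat.add_comm]
      · simp

lemma pv_range_spec (cs : List Char) :
    ((List.range (cs.length - 1)).countP
      (fun k => pvV (cs.getD k 'a') != pvV (cs.getD (k + 1) 'a'))) = pvSpec cs := by
  induction cs with
  | nil => simp [pvSpec]
  | cons a t ih =>
    cases t with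
    | nil => simp [pvSpec]
    | cons b t' =>
      have hlen : (a :: b :: t').length - 1 = ((b :: t').length - 1) + 1 := by simp
      rw [hlen, List.range_succ_eq_map]
      simp only [List.countP_cons, List.countP_map, Function.comp_def, List.getD_cons_succ,
        List.getD_cons_zero]
      simp only [List.getD_cons_succ] at ih
      rw [ih]
      simp only [pvSpec]
      split_ifs with h
      · simp [Nat.add_comm]
      · simp

lemma pv_step_eq (c : Char) :
    (if c ∈ PySem.Set.ofList "aeiou".toList then (1:Int) else -1) = pvStep c := by
  simp [pvStep, pvV, PySem.Set.mem_ofList]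

lemma pv_pref_eq (cs : List Char) : ∀ (p : List Int) (hp : p ≠ []),
    cs.foldl (fun p c => p ++ [PySem.List.pyGetD p (-1) 0 +
        (if c ∈ PySem.Set.ofList "aeiou".toList then (1:Int) else -1)]) p
      = p ++ pvTail (p.getLast hp) cs := by
  induction cs with
  | nil => intro p hp; simp [pvTail]
  | cons c t ih =>
    intro p hp
    have h1 : PySem.List.pyGetD p (-1) 0 = p.getLast hp := PySem.List.pyGetD_neg_one p 0 hp
    simp only [List.foldl_cons, h1]
    rw [pv_step_eq c]
    rw [ih (p ++ [p.getLast hp + pvStep c]) (by simp)]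
    simp [pvTail]

lemma pv_pref_getD (cs : List Char) (k : Nat) (h : k ≤ cs.length) :
    (0 :: pvTail 0 cs).getD k 0 = pvBal (cs.take k) := by
  cases k with
  | zero => simp [pvBal]
  | succ k =>
    simp only [List.getD_cons_succ]
    rw [pv_tail_getD cs 0 k (by omega)]
    simp

lemma pv_step_zero_iff (x y : Char) :
    (pvStep x + pvStep y = 0) ↔ (pvV x != pvV y) = true := by
  simp only [pvStep]
  cases hx : pvV x <;> cases hy : pvV y <;> simp

lemma pv_main (cs : List Char) :
    ((PySem.List.pyRange 1 (cs.length : Int) 1).foldl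
      (fun (st : Int × Int) r =>
        (st.1 + 1,
         if PySem.List.pyGetD (0 :: pvTail 0 cs) (r + 1) 0
            - PySem.List.pyGetD (0 :: pvTail 0 cs) st.1 0 = 0
         then st.2 + 1 else st.2)) (0, 0)).2
    = ((cs.zip (cs.drop 1)).countP
        (fun p => ("aeiou".toList.contains p.1) != ("aeiou".toList.contains p.2)) : Nat) := by
  rw [pv_loop (0 :: pvTail 0 cs) ((cs.length : Int) - 1).toNat 1 (cs.length : Int) 0 0
      (by omega) (by norm_num)]
  rw [PySem.List.pyRange_one, List.countP_map, zero_add]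
  have hcnt : ∀ k ∈ List.range (((cs.length : Int) - 1).toNat),
      ((fun r => decide (PySem.List.pyGetD (0 :: pvTail 0 cs) (r + 1) 0
          - PySem.List.pyGetD (0 :: pvTail 0 cs) (r - 1) 0 = 0)) ∘ (fun k : Nat => (1 : Int) + k)) k
      = (fun k => pvV (cs.getD k 'a') != pvV (cs.getD (k + 1) 'a')) k := by
    intro k hk
    simp only [List.mem_range] at hk
    have hk' : k + 1 < cs.length := by omega
    simp only [Function.comp_def]
    have h1 : (1 : Int) + k + 1 = ((k + 2 : Nat) : Int) := by push_cast; ring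
    have h2 : (1 : Int) + k - 1 = ((k : Nat) : Int) := by ring
    rw [h1, h2, PySem.List.pyGetD_natCast, PySem.List.pyGetD_natCast]
    rw [pv_pref_getD cs (k + 2) (by omega), pv_pref_getD cs k (by omega)]
    rw [pv_window cs k hk']
    have hiff := pv_step_zero_iff (cs.getD k 'a') (cs.getD (k + 1) 'a')
    by_cases h : pvStep (cs.getD k 'a') + pvStep (cs.getD (k + 1) 'a') = 0
    · rw [hiff.mp h, h]; decide
    · have hf : (pvV (cs.getD k 'a') != pvV (cs.getD (k + 1) 'a')) = false := by
        cases hb : (pvV (cs.getD k 'a') != pvV (cs.getD (k + 1) 'a')) with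
        | true => exact absurd (hiff.mpr hb) h
        | false => rfl
      rw [hf, decide_eq_false h]
  rw [List.countP_congr (fun x hx => by rw [hcnt x hx])]
  have hnn : ((cs.length : Int) - 1).toNat = cs.length - 1 := by omega
  rw [hnn, pv_range_spec cs, ← pv_zip_spec cs]
  rfl

theorem alternating_pairs_spec : Claim_equal_alternating_pairs := by
  intro s _
  unfold Spec_alternating_pairs alternating_pairs alternating_pairs_alt
  simp only
  rw [pv_pref_eq s.toList [0] (by simp)]
  simp only [List.getLast_singleton, List.singleton_append]
  exact pv_main s.toList
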